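-- pv_equiv track=rewrite | github.com/KhoiBui16/28Tech_Code_Online | Python/Source Code Python Contest/Contest_03_HamVaLyThuyetSo/Bai15_SoPhenic.py | isPhenicNumAdvanced
-- ===== SOURCE A (Python) =====
-- import math
--
-- def isPhenicNumAdvanced(n):
--     cnt = 0
--     i = 2
--     while i <= math.isqrt(n):
--         if n % i == 0:
--             exponent = 0
--             while n % i == 0 :
--                 exponent += 1
--                 n //= i
--             if exponent >= 2 :
--                 return False
--             cnt += 1
--         i += 1
--     if n > 1:
--         cnt += 1
--     return cnt == 3
-- ===== SOURCE B (Python) =====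
-- def isPhenicNumAdvanced(n):
--     # Divisor-counting characterization: n is a product of 3 distinct primes
--     # iff n is squarefree and has exactly 8 divisors.  Count divisors in
--     # pairs (d, n//d) for d up to sqrt(n), rejecting any square divisor.
--     cnt = 0
--     d = 1
--     while d * d <= n:
--         if d > 1 and n % (d * d) == 0:
--             return False
--         if n % d == 0:
--             cnt += 2
--         d += 1
--     return cnt == 8
-- ===== Notes on version B (the rewrite author's own statement) =====
-- stated objective: alternative
-- what changed: B never factorizes n at all: it counts divisors in pairs (d, n//d) for d up to sqrt(n) while rejecting any square divisor d*d, and classifies via the characterization 'sphenic iff squarefree with exactly 8 divisors', instead of A's trial-division prime factorization with exponent tracking.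
-- crash fix: On negative n, A raises ValueError (math.isqrt of a negative argument) while B's loop condition d*d <= n is immediately false and B returns False. — e.g. on isPhenicNumAdvanced(-1): A raises ValueError, B returns false
import Mathlib
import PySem

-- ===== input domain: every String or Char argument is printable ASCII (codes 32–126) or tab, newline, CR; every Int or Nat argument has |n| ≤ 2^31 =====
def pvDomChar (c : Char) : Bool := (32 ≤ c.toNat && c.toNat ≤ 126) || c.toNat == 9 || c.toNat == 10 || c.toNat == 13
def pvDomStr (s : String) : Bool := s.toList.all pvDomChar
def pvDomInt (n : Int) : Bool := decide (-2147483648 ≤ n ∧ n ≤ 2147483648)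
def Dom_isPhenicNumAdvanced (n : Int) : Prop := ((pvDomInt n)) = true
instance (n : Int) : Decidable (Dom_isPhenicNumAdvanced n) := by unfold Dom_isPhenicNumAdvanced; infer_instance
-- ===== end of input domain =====

-- B replaces A's trial-division factorization by a divisor-pair count: it counts the divisors of n
-- in pairs (d, n//d) for d up to sqrt(n), rejects any square divisor, and uses the characterization
-- 'product of three distinct primes ⟺ squarefree with exactly 8 divisors'.

-- ===== PORT A =====
-- inner loop 'while n % i == 0: exponent += 1; n //= i' of A, returning (exponent, remaining n).
-- The fuel argument is a totality guard only: every call below supplies provably sufficient fuel.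
def aDivOut : Nat → Int → Int → Int × Int
  | 0, n, _ => (0, n)
  | fuel + 1, n, i =>
    if PySem.Int.mod n i = 0 then
      let p := aDivOut fuel (PySem.Int.floordiv n i) i
      (p.1 + 1, p.2)
    else (0, n)

-- outer loop of A; 'i <= math.isqrt(n)' is ported as 'i ≤ Int.sqrt n', exact on the 0 ≤ n of Pre_
-- (math.isqrt raises ValueError on negative n, which Pre_ excludes). Fuel is a totality guard only.
def aLoop : Nat → Int → Int → Int → Bool
  | 0, _, _, _ => false
  | fuel + 1, n, i, cnt =>
    if i ≤ Int.sqrt n then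
      if PySem.Int.mod n i = 0 then
        let p := aDivOut (n.toNat + 1) n i
        if 2 ≤ p.1 then false
        else aLoop fuel p.2 (i + 1) (cnt + 1)
      else aLoop fuel n (i + 1) cnt
    else decide ((if 1 < n then cnt + 1 else cnt) = 3)

def isPhenicNumAdvanced (n : Int) : Bool := aLoop (2 * n.toNat + 2) n 2 0

-- ===== PORT B =====
-- B's single while loop: d runs upward while d*d <= n, returning False on a square divisor and
-- adding 2 to cnt for each divisor found. Fuel is a totality guard only.
def bLoop : Nat → Int → Int → Int → Bool
  | 0, _, _, _ => false
  | fuel + 1, n, d, cnt =>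
    if d * d ≤ n then
      if 1 < d ∧ PySem.Int.mod n (d * d) = 0 then false
      else if PySem.Int.mod n d = 0 then bLoop fuel n (d + 1) (cnt + 2)
      else bLoop fuel n (d + 1) cnt
    else decide (cnt = 8)

def isPhenicNumAdvanced_alt (n : Int) : Bool := bLoop (n.toNat + 2) n 1 0

-- ===== PRECONDITION & SPEC =====
-- Pre_ excludes exactly the negative n, on which A raises ValueError (math.isqrt).
def Pre_isPhenicNumAdvanced (n : Int) : Prop := 0 ≤ n
instance (n : Int) : Decidable (Pre_isPhenicNumAdvanced n) := by unfold Pre_isPhenicNumAdvanced; infer_instance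
def pvWitness_isPhenicNumAdvanced : Int := 30

-- On negative n, A raises ValueError (math.isqrt of a negative argument) while B returns False.
def Raises_isPhenicNumAdvanced (n : Int) : Prop := n < 0
instance (n : Int) : Decidable (Raises_isPhenicNumAdvanced n) := by unfold Raises_isPhenicNumAdvanced; infer_instance
def pvRaiseWitness_isPhenicNumAdvanced : Int := -1
def pvRaiseWitnessOut_isPhenicNumAdvanced : Bool := false

def Spec_isPhenicNumAdvanced (n : Int) (out : Bool) : Prop := out = isPhenicNumAdvanced_alt n
instance (n : Int) (out : Bool) : Decidable (Spec_isPhenicNumAdvanced n out) := by unfold Spec_isPhenicNumAdvanced; infer_instance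

-- ===== CLAIM (what is proved, stated in full; the proofs are below) =====
def Claim_equal_isPhenicNumAdvanced : Prop := ∀ (n : Int), Dom_isPhenicNumAdvanced n → Pre_isPhenicNumAdvanced n → Spec_isPhenicNumAdvanced n (isPhenicNumAdvanced n)
def Claim_raises_isPhenicNumAdvanced : Prop := (∀ (n : Int), Dom_isPhenicNumAdvanced n → Raises_isPhenicNumAdvanced n → ¬ Pre_isPhenicNumAdvanced n) ∧ (Dom_isPhenicNumAdvanced (pvRaiseWitness_isPhenicNumAdvanced) ∧ Raises_isPhenicNumAdvanced (pvRaiseWitness_isPhenicNumAdvanced) ∧ isPhenicNumAdvanced_alt (pvRaiseWitness_isPhenicNumAdvanced) = pvRaiseWitnessOut_isPhenicNumAdvanced)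

-- ===== LEMMAS AND PROOFS =====

theorem pv_le_sqrt_iff (n i : Int) (hn : 0 ≤ n) (hi : 0 ≤ i) : i ≤ Int.sqrt n ↔ i * i ≤ n := by
  unfold Int.sqrt
  constructor
  · intro h
    have h' : i.toNat ≤ Nat.sqrt n.toNat := by omega
    have h2 := Nat.le_sqrt.mp h'
    have h3 : (i.toNat : Int) * (i.toNat : Int) ≤ (n.toNat : Int) := by exact_mod_cast h2
    rw [Int.toNat_of_nonneg hi, Int.toNat_of_nonneg hn] at h3
    exact h3
  · intro h
    have h3 : (i.toNat : Int) * (i.toNat : Int) ≤ (n.toNat : Int) := by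
      rw [Int.toNat_of_nonneg hi, Int.toNat_of_nonneg hn]; exact h
    have h2 : i.toNat * i.toNat ≤ n.toNat := by exact_mod_cast h3
    have := Nat.le_sqrt.mpr h2
    omega

theorem pv_aDivOut_spec : ∀ (fuel : ℕ) (n i : Int), 1 ≤ n → 2 ≤ i → n.toNat < fuel →
    ∃ (k : ℕ) (m : Int), aDivOut fuel n i = ((k : Int), m) ∧ n = i ^ k * m ∧ 1 ≤ m ∧ ¬ i ∣ m := by
  intro fuel
  induction fuel with
  | zero => intro n i _ _ hf; omega
  | succ f ih =>
    intro n i hn hi hf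
    by_cases hd : PySem.Int.mod n i = 0
    · have hdvd : i ∣ n := (PySem.Int.mod_eq_zero_iff_dvd n i).mp hd
      have hfd : PySem.Int.floordiv n i = n / i := PySem.Int.floordiv_eq_ediv_of_pos (by omega)
      have hmul : i * (n / i) = n := Int.mul_ediv_cancel' hdvd
      have hq1 : 1 ≤ n / i := by nlinarith [hmul]
      have hqlt : n / i < n := by nlinarith [hmul]
      obtain ⟨k, m, heq, hnm, hm1, hnd⟩ := ih (n / i) i hq1 hi (by omega)
      refine ⟨k + 1, m, ?_, ?_, hm1, hnd⟩
      · simp only [aDivOut, if_pos hd, hfd, heq, Prod.mk.injEq]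
        constructor
        · push_cast; ring
        · trivial
      · rw [← hmul, hnm, pow_succ]; ring
    · refine ⟨0, n, ?_, by simp, hn, ?_⟩
      · have h0 : aDivOut (f + 1) n i = (0, n) := by
          simp only [aDivOut, if_neg hd]
        rw [h0]
        norm_num
      · intro hdvd
        exact hd ((PySem.Int.mod_eq_zero_iff_dvd n i).mpr hdvd)

-- a number > 1 with no divisor j ∈ [2, i) and no divisor ≤ its square root is prime
theorem pv_prime_of_no_small_factor (n i : Int) (h2 : 2 ≤ n) (hi : 2 ≤ i) (hni : n < i * i)
    (hNF : ∀ j : Int, 2 ≤ j → j < i → ¬ j ∣ n) : n.toNat.Prime := by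
  set N := n.toNat with hN
  have hcast : (N : Int) = n := Int.toNat_of_nonneg (by omega)
  by_contra hnp
  have hmf := Nat.minFac_sq_le_self (by omega) hnp
  have hp : N.minFac.Prime := Nat.minFac_prime (by omega)
  have h2m : 2 ≤ N.minFac := hp.two_le
  have hdvd : N.minFac ∣ N := Nat.minFac_dvd N
  have hdint : (N.minFac : Int) ∣ n := by rw [← hcast]; exact_mod_cast hdvd
  have hsq : (N.minFac : Int) * (N.minFac : Int) ≤ n := by
    have : N.minFac * N.minFac ≤ N := by nlinarith [hmf]
    calc ((N.minFac : Int)) * N.minFac = ((N.minFac * N.minFac : ℕ) : Int) := by push_cast; ring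
    _ ≤ (N : Int) := by exact_mod_cast this
    _ = n := hcast
  have hlt : (N.minFac : Int) < i := by nlinarith
  exact hNF (N.minFac) (by exact_mod_cast h2m) hlt hdint

-- the smallest divisor i ≥ 2 of n is prime
theorem pv_least_divisor_prime (n i : Int) (hn : 1 ≤ n) (hi : 2 ≤ i) (hdvd : i ∣ n)
    (hNF : ∀ j : Int, 2 ≤ j → j < i → ¬ j ∣ n) : i.toNat.Prime := by
  have hcast : (i.toNat : Int) = i := Int.toNat_of_nonneg (by omega)
  rw [Nat.prime_def_lt]
  refine ⟨by omega, fun m hm hmd => ?_⟩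
  by_contra hm1
  have hm0 : m ≠ 0 := by rintro rfl; simp at hmd; omega
  have h2m : 2 ≤ m := by omega
  have hmi : (m : Int) ∣ i := by rw [← hcast]; exact_mod_cast hmd
  exact hNF m (by exact_mod_cast h2m) (by rw [← hcast]; exact_mod_cast hm) (hmi.trans hdvd)

-- A's outer loop computes: n is squarefree and cnt plus its number of distinct primes is 3
theorem pv_aLoop_spec : ∀ (fa : ℕ) (n i cnt : Int), 1 ≤ n → 2 ≤ i → 1 ≤ fa → 2 * n.toNat ≤ fa + i.toNat →
    (∀ j : Int, 2 ≤ j → j < i → ¬ j ∣ n) →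
    aLoop fa n i cnt = decide (Squarefree n.toNat ∧ cnt + (n.toNat.primeFactors.card : Int) = 3) := by
  intro fa
  induction fa with
  | zero => intro n i cnt _ _ hfa; omega
  | succ fa ih =>
    intro n i cnt hn hi _ hfa hNF
    have hcast : (n.toNat : Int) = n := Int.toNat_of_nonneg (by omega)
    by_cases hc : i * i ≤ n
    · have hsq : i ≤ Int.sqrt n := (pv_le_sqrt_iff n i (by omega) (by omega)).mpr hc
      have h2i : i + i ≤ n := by nlinarith
      by_cases hdvd : i ∣ n
      · have hmod : PySem.Int.mod n i = 0 := (PySem.Int.mod_eq_zero_iff_dvd n i).mpr hdvd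
        obtain ⟨k, m, heq, hnm, hm1, hmnd⟩ := pv_aDivOut_spec (n.toNat + 1) n i hn hi (by omega)
        have hk1 : 1 ≤ k := by
          by_contra hk0
          have hk0' : k = 0 := by omega
          subst hk0'
          simp only [pow_zero, one_mul] at hnm
          rw [hnm] at hdvd
          exact hmnd hdvd
        have hiP : i.toNat.Prime := pv_least_divisor_prime n i hn hi hdvd hNF
        have hicast : (i.toNat : Int) = i := Int.toNat_of_nonneg (by omega)
        rcases (by omega : k = 1 ∨ 2 ≤ k) with hk | hk
        · -- exponent 1: recurse on m with i+1, cnt+1, and rewrite the spec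
          subst hk
          have hmn : n = i * m := by rw [hnm]; ring
          have hmm : m + m ≤ n := by nlinarith
          have hA : aLoop (fa + 1) n i cnt = aLoop fa m (i + 1) (cnt + 1) := by
            simp only [aLoop, if_pos hsq, if_pos hmod, heq]
            norm_num
          rw [hA]
          rw [ih m (i + 1) (cnt + 1) hm1 (by omega) (by omega) (by omega) ?_]
          · -- equate the two decide's
            have hmcast : (m.toNat : Int) = m := Int.toNat_of_nonneg (by omega)
            have hNsplit : n.toNat = i.toNat * m.toNat := by
              have : ((i.toNat * m.toNat : ℕ) : Int) = (n.toNat : Int) := by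
                push_cast; rw [hicast, hmcast, hcast, hmn]
              exact_mod_cast this.symm
            have hndm : ¬ i.toNat ∣ m.toNat := by
              intro h
              apply hmnd
              rw [← hicast, ← hmcast]
              exact_mod_cast h
            have hcop : (i.toNat).Coprime m.toNat := (hiP.coprime_iff_not_dvd).mpr hndm
            have hSF : Squarefree n.toNat ↔ Squarefree m.toNat := by
              rw [hNsplit, Nat.squarefree_mul hcop]
              exact ⟨fun h => h.2, fun h => ⟨hiP.squarefree, h⟩⟩
            have hm0 : m.toNat ≠ 0 := by omega
            have hPF : n.toNat.primeFactors = insert i.toNat m.toNat.primeFactors := by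
              rw [hNsplit, Nat.primeFactors_mul (by omega) hm0, hiP.primeFactors]
              ext x; simp
            have hnotmem : i.toNat ∉ m.toNat.primeFactors := by
              intro h
              exact hndm (Nat.dvd_of_mem_primeFactors h)
            have hcard : n.toNat.primeFactors.card = m.toNat.primeFactors.card + 1 := by
              rw [hPF, Finset.card_insert_of_notMem hnotmem]
            rw [decide_eq_decide]
            constructor
            · rintro ⟨h1, h2⟩; exact ⟨hSF.mpr h1, by rw [hcard]; push_cast at h2 ⊢; omega⟩
            · rintro ⟨h1, h2⟩; exact ⟨hSF.mp h1, by rw [hcard] at h2; push_cast at h2 ⊢; omega⟩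
          · -- invariant for the recursive call
            intro j hj2 hji hjm
            have hjn : j ∣ n := by rw [hmn]; exact hjm.mul_left i
            rcases (by omega : j < i ∨ j = i) with h | h
            · exact hNF j hj2 h hjn
            · subst h; exact hmnd hjm
        · -- exponent ≥ 2: A returns False and n is not squarefree
          have hA : aLoop (fa + 1) n i cnt = false := by
            have : (2 : Int) ≤ (k : Int) := by exact_mod_cast hk
            simp only [aLoop, if_pos hsq, if_pos hmod, heq]
            rw [if_pos this]
          have hii : (i * i) ∣ n := by
            obtain ⟨k'', rfl⟩ : ∃ k'', k = k'' + 2 := ⟨k - 2, by omega⟩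
            exact ⟨i ^ k'' * m, by rw [hnm]; ring⟩
          have hiiN : i.toNat * i.toNat ∣ n.toNat := by
            have : ((i.toNat * i.toNat : ℕ) : Int) ∣ (n.toNat : Int) := by
              push_cast; rw [hicast, hcast]; exact hii
            exact_mod_cast this
          have hnSF : ¬ Squarefree n.toNat := by
            intro h
            have := Nat.isUnit_iff.mp (h i.toNat hiiN)
            omega
          rw [hA]
          symm
          simp only [decide_eq_false_iff_not]
          rintro ⟨h1, _⟩
          exact hnSF h1
      · -- i does not divide n: both sides advance i
        have hmod : ¬ PySem.Int.mod n i = 0 := fun h => hdvd ((PySem.Int.mod_eq_zero_iff_dvd n i).mp h)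
        have hA : aLoop (fa + 1) n i cnt = aLoop fa n (i + 1) cnt := by
          simp [aLoop, if_pos hsq, if_neg hmod]
        rw [hA]
        apply ih n (i + 1) cnt hn (by omega) (by omega) (by omega)
        intro j hj2 hji hjn
        rcases (by omega : j < i ∨ j = i) with h | h
        · exact hNF j hj2 h hjn
        · subst h; exact hdvd hjn
    · -- loop exit: n = 1 or n prime
      have hsq : ¬ i ≤ Int.sqrt n := fun h => hc ((pv_le_sqrt_iff n i (by omega) (by omega)).mp h)
      have hA : aLoop (fa + 1) n i cnt = decide ((if 1 < n then cnt + 1 else cnt) = 3) := by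
        simp [aLoop, if_neg hsq]
      rw [hA]
      by_cases h1n : 1 < n
      · have hP : n.toNat.Prime := pv_prime_of_no_small_factor n i (by omega) hi (by omega) hNF
        rw [if_pos h1n, decide_eq_decide, hP.primeFactors]
        constructor
        · intro h; exact ⟨hP.squarefree, by simp; omega⟩
        · rintro ⟨_, h⟩; simp at h; omega
      · have hn1 : n.toNat = 1 := by omega
        rw [if_neg h1n, decide_eq_decide, hn1]
        simp only [Nat.primeFactors_one, Finset.card_empty, Nat.cast_zero, add_zero]
        exact ⟨fun h => ⟨squarefree_one, h⟩, fun h => h.2⟩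

-- B's loop computes: n is squarefree and cnt plus twice the number of divisors in [d, √n] is 8
theorem pv_bLoop_spec : ∀ (fb : ℕ) (n d cnt : Int), 1 ≤ n → 1 ≤ d → d.toNat ≤ n.toNat + 1 →
    n.toNat + 2 ≤ fb + d.toNat →
    (∀ j : ℕ, 2 ≤ j → (j : Int) < d → ¬ (j * j ∣ n.toNat)) →
    bLoop fb n d cnt = decide (Squarefree n.toNat ∧
      cnt + 2 * ((((Finset.Ico d.toNat (n.toNat.sqrt + 1)).filter (· ∣ n.toNat)).card : ℕ) : Int) = 8) := by
  intro fb
  induction fb with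
  | zero => intro n d cnt _ _ _ hfb; omega
  | succ fb ih =>
    intro n d cnt hn hd hdn hfb hNS
    have hcast : (n.toNat : Int) = n := Int.toNat_of_nonneg (by omega)
    have hdcast : (d.toNat : Int) = d := Int.toNat_of_nonneg (by omega)
    set N := n.toNat with hN
    set D := d.toNat with hD
    by_cases hc : d * d ≤ n
    · have hDD : D * D ≤ N := by
        have : ((D * D : ℕ) : Int) ≤ (N : Int) := by push_cast; rw [hdcast, hcast]; exact hc
        exact_mod_cast this
      have hDs : D ≤ N.sqrt := Nat.le_sqrt.mpr hDD
      have hDN : D ≤ N := le_trans (Nat.le_mul_of_pos_left D (by omega)) hDD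
      by_cases hsqd : 1 < d ∧ PySem.Int.mod n (d * d) = 0
      · -- square divisor found: B returns False, n is not squarefree
        have hB : bLoop (fb + 1) n d cnt = false := by
          simp only [bLoop, if_pos hc, if_pos hsqd]
        have hdd : (d * d) ∣ n := (PySem.Int.mod_eq_zero_iff_dvd n (d * d)).mp hsqd.2
        have hddN : D * D ∣ N := by
          have : ((D * D : ℕ) : Int) ∣ (N : Int) := by push_cast; rw [hdcast, hcast]; exact hdd
          exact_mod_cast this
        have hnSF : ¬ Squarefree N := by
          intro h
          have := Nat.isUnit_iff.mp (h D hddN)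
          omega
        rw [hB]
        symm
        simp only [decide_eq_false_iff_not]
        rintro ⟨h1, _⟩
        exact hnSF h1
      · -- step: either count d as a divisor (cnt += 2) or not, then d += 1
        have hinv : ∀ j : ℕ, 2 ≤ j → (j : Int) < d + 1 → ¬ (j * j ∣ N) := by
          intro j hj2 hjd hjdvd
          have hjD : j ≤ D := by rw [← hdcast] at hjd; exact_mod_cast (by omega : (j : Int) ≤ (D : Int))
          rcases (by omega : j < D ∨ j = D) with h | h
          · exact hNS j hj2 (by rw [← hdcast]; exact_mod_cast h) hjdvd
          · subst h
            have h1d : 1 < d := by rw [← hdcast]; exact_mod_cast (by omega : (1 : Int) < (D : Int))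
            have hmodne : PySem.Int.mod n (d * d) ≠ 0 := fun hm => hsqd ⟨h1d, hm⟩
            apply hmodne
            rw [PySem.Int.mod_eq_zero_iff_dvd]
            have : ((D * D : ℕ) : Int) ∣ (N : Int) := by exact_mod_cast hjdvd
            rw [hcast] at this
            push_cast at this
            rw [hdcast] at this
            exact this
        have hd1 : (d + 1).toNat = D + 1 := by omega
        have hfuel : N + 2 ≤ fb + (d + 1).toNat := by omega
        have hd1n : (d + 1).toNat ≤ N + 1 := by
          have := Nat.sqrt_le_self N
          omega
        by_cases hmod : PySem.Int.mod n d = 0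
        · -- d divides n: count it twice
          have hB : bLoop (fb + 1) n d cnt = bLoop fb n (d + 1) (cnt + 2) := by
            simp only [bLoop, if_pos hc, if_neg hsqd, if_pos hmod]
          have hdvd : d ∣ n := (PySem.Int.mod_eq_zero_iff_dvd n d).mp hmod
          have hDdvd : D ∣ N := by
            have : ((D : ℕ) : Int) ∣ (N : Int) := by rw [hdcast, hcast]; exact hdvd
            exact_mod_cast this
          have hins : Finset.Ico D (N.sqrt + 1) = insert D (Finset.Ico (D + 1) (N.sqrt + 1)) := by
            ext x
            simp only [Finset.mem_Ico, Finset.mem_insert]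
            omega
          have hnotmem : D ∉ (Finset.Ico (D + 1) (N.sqrt + 1)).filter (· ∣ N) := by
            simp [Finset.mem_filter]
          have hcard : ((Finset.Ico D (N.sqrt + 1)).filter (· ∣ N)).card =
              ((Finset.Ico (D + 1) (N.sqrt + 1)).filter (· ∣ N)).card + 1 := by
            rw [hins, Finset.filter_insert, if_pos hDdvd, Finset.card_insert_of_notMem hnotmem]
          rw [hB, ih n (d + 1) (cnt + 2) hn (by omega) hd1n hfuel hinv]
          rw [hd1, decide_eq_decide]
          simp only [← hN]
          rw [hcard]
          constructor
          · rintro ⟨h1, h2⟩; exact ⟨h1, by push_cast at h2 ⊢; omega⟩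
          · rintro ⟨h1, h2⟩; exact ⟨h1, by push_cast at h2 ⊢; omega⟩
        · -- d does not divide n: the count is unchanged
          have hB : bLoop (fb + 1) n d cnt = bLoop fb n (d + 1) cnt := by
            simp only [bLoop, if_pos hc, if_neg hsqd, if_neg hmod]
          have hDnd : ¬ D ∣ N := by
            intro h
            apply hmod
            rw [PySem.Int.mod_eq_zero_iff_dvd]
            have : ((D : ℕ) : Int) ∣ (N : Int) := by exact_mod_cast h
            rw [hdcast, hcast] at this
            exact this
          have hins : Finset.Ico D (N.sqrt + 1) = insert D (Finset.Ico (D + 1) (N.sqrt + 1)) := by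
            ext x
            simp only [Finset.mem_Ico, Finset.mem_insert]
            omega
          have hcard : ((Finset.Ico D (N.sqrt + 1)).filter (· ∣ N)).card =
              ((Finset.Ico (D + 1) (N.sqrt + 1)).filter (· ∣ N)).card := by
            rw [hins, Finset.filter_insert, if_neg hDnd]
          rw [hB, ih n (d + 1) cnt hn (by omega) hd1n hfuel hinv]
          rw [hd1, decide_eq_decide]
          simp only [← hN]
          rw [hcard]
    · -- loop exit: every divisor slot in [D, √N] is empty, and n is squarefree by the invariant
      have hB : bLoop (fb + 1) n d cnt = decide (cnt = 8) := by
        simp only [bLoop, if_neg hc]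
      have hND : N < D * D := by
        have : (N : Int) < ((D * D : ℕ) : Int) := by push_cast; rw [hdcast, hcast]; omega
        exact_mod_cast this
      have hsD : N.sqrt < D := Nat.sqrt_lt'.mpr (by rw [pow_two]; exact hND)
      have hempty : Finset.Ico D (N.sqrt + 1) = ∅ := Finset.Ico_eq_empty (by omega)
      have hSF : Squarefree N := by
        intro x hx
        rcases (by omega : x = 0 ∨ x = 1 ∨ 2 ≤ x) with rfl | rfl | h2x
        · simp at hx; omega
        · exact isUnit_one
        · exfalso
          have hxN : x * x ≤ N := Nat.le_of_dvd (by omega) hx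
          have hxD : x < D := by nlinarith
          exact hNS x h2x (by rw [← hdcast]; exact_mod_cast hxD) hx
      rw [hB, hempty, decide_eq_decide]
      simp only [Finset.filter_empty, Finset.card_empty, Nat.cast_zero, mul_zero, add_zero]
      exact ⟨fun h => ⟨hSF, h⟩, fun h => h.2⟩

-- a squarefree number has 2 ^ (number of distinct primes) divisors
theorem pv_card_divisors_sf (N : ℕ) (h0 : N ≠ 0) (hs : Squarefree N) :
    N.divisors.card = 2 ^ N.primeFactors.card := by
  rw [Nat.card_divisors h0, Finset.prod_congr rfl (fun p hp => ?_), Finset.prod_const]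
  have hle : N.factorization p ≤ 1 := hs.natFactorization_le_one p
  have hne : N.factorization p ≠ 0 := by
    rw [← Nat.support_factorization] at hp
    exact Finsupp.mem_support_iff.mp hp
  omega

-- a squarefree number ≥ 2 is not a perfect square
theorem pv_sf_not_square (N : ℕ) (h2 : 2 ≤ N) (hs : Squarefree N) : N.sqrt * N.sqrt ≠ N := by
  intro h
  have hv : N.sqrt * N.sqrt ∣ N := by rw [h]
  have h1 := Nat.isUnit_iff.mp (hs N.sqrt hv)
  rw [h1] at h
  omega

-- pairing d ↦ N / d: a non-square N has as many divisors ≤ √N as > √N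
theorem pv_pairing (N : ℕ) (h1 : 1 ≤ N) (hns : N.sqrt * N.sqrt ≠ N) :
    2 * (N.divisors.filter (· ≤ N.sqrt)).card = N.divisors.card := by
  have hsplit := Finset.card_filter_add_card_filter_not
    (s := N.divisors) (p := (· ≤ N.sqrt))
  have hbij : (N.divisors.filter (· ≤ N.sqrt)).card
      = (N.divisors.filter (fun d => ¬ d ≤ N.sqrt)).card := by
    apply Finset.card_bij' (fun d _ => N / d) (fun d _ => N / d)
    · intro a ha
      simp only [Finset.mem_filter, Nat.mem_divisors] at ha ⊢
      obtain ⟨⟨hdvd, hN0⟩, hle⟩ := ha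
      refine ⟨⟨Nat.div_dvd_of_dvd hdvd, hN0⟩, ?_⟩
      intro hle2
      have hmul : a * (N / a) = N := Nat.mul_div_cancel' hdvd
      have : N ≤ N.sqrt * N.sqrt := by
        calc N = a * (N / a) := hmul.symm
        _ ≤ N.sqrt * N.sqrt := Nat.mul_le_mul hle hle2
      have := Nat.sqrt_le N
      omega
    · intro b hb
      simp only [Finset.mem_filter, Nat.mem_divisors] at hb ⊢
      obtain ⟨⟨hdvd, hN0⟩, hgt⟩ := hb
      refine ⟨⟨Nat.div_dvd_of_dvd hdvd, hN0⟩, ?_⟩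
      by_contra hgt2
      have hmul : b * (N / b) = N := Nat.mul_div_cancel' hdvd
      have : (N.sqrt + 1) * (N.sqrt + 1) ≤ N := by
        calc (N.sqrt + 1) * (N.sqrt + 1) ≤ b * (N / b) := Nat.mul_le_mul (by omega) (by omega)
        _ = N := hmul
      have hlt := Nat.lt_succ_sqrt N
      simp only [Nat.succ_eq_add_one] at hlt
      omega
    · intro a ha
      simp only [Finset.mem_filter, Nat.mem_divisors] at ha
      exact Nat.div_div_self ha.1.1 ha.1.2
    · intro b hb
      simp only [Finset.mem_filter, Nat.mem_divisors] at hb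
      exact Nat.div_div_self hb.1.1 hb.1.2
  omega

-- the divisors of N in [1, √N] are exactly the divisors ≤ √N
theorem pv_Ico_filter_eq (N : ℕ) (h1 : 1 ≤ N) :
    (Finset.Ico 1 (N.sqrt + 1)).filter (· ∣ N) = N.divisors.filter (· ≤ N.sqrt) := by
  ext x
  simp only [Finset.mem_filter, Finset.mem_Ico, Nat.mem_divisors]
  constructor
  · rintro ⟨⟨hx1, hx2⟩, hdvd⟩
    exact ⟨⟨hdvd, by omega⟩, by omega⟩
  · rintro ⟨⟨hdvd, _⟩, hle⟩
    have := Nat.pos_of_dvd_of_pos hdvd (by omega)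
    exact ⟨⟨this, by omega⟩, hdvd⟩

-- bridge: for squarefree N, 'three distinct primes' ⟺ 'four divisors up to √N' (⟺ 8 divisors)
theorem pv_bridge (N : ℕ) (h1 : 1 ≤ N) (hsf : Squarefree N) :
    N.primeFactors.card = 3 ↔ ((Finset.Ico 1 (N.sqrt + 1)).filter (· ∣ N)).card = 4 := by
  rcases (by omega : N = 1 ∨ 2 ≤ N) with rfl | h2
  · constructor
    · intro h
      simp [Nat.primeFactors_one] at h
    · intro h
      have hc : ((Finset.Ico 1 (Nat.sqrt 1 + 1)).filter (· ∣ 1)).card = 1 := by decide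
      omega
  · have hns := pv_sf_not_square N h2 hsf
    have hpair := pv_pairing N h1 hns
    have hcd := pv_card_divisors_sf N (by omega) hsf
    rw [pv_Ico_filter_eq N h1]
    constructor
    · intro h
      rw [h] at hcd
      norm_num at hcd
      omega
    · intro h
      rw [h] at hpair
      have h8 : (2 : ℕ) ^ N.primeFactors.card = 2 ^ 3 := by
        rw [← hcd]; omega
      exact Nat.pow_right_injective (le_refl 2) h8

-- ===== VERDICT (by name: the statement is the Claim_ definition above) =====
theorem isPhenicNumAdvanced_spec : Claim_equal_isPhenicNumAdvanced := by
  unfold Claim_equal_isPhenicNumAdvanced Spec_isPhenicNumAdvanced Pre_isPhenicNumAdvanced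
  intro n _ hpre
  rcases (by omega : n = 0 ∨ 1 ≤ n) with rfl | h1
  · decide
  · show aLoop (2 * n.toNat + 2) n 2 0 = bLoop (n.toNat + 2) n 1 0
    have h1N : 1 ≤ n.toNat := by omega
    rw [pv_aLoop_spec (2 * n.toNat + 2) n 2 0 h1 le_rfl (by omega) (by omega)
      (fun j hj2 hji _ => by omega)]
    rw [pv_bLoop_spec (n.toNat + 2) n 1 0 h1 le_rfl (by omega) (by omega)
      (fun j hj2 hjd => by
        exfalso
        have : (2 : Int) ≤ (j : Int) := by exact_mod_cast hj2
        omega)]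
    rw [decide_eq_decide]
    have hone : (1 : Int).toNat = 1 := rfl
    rw [hone]
    constructor
    · rintro ⟨hsf, h⟩
      refine ⟨hsf, ?_⟩
      have h3 : n.toNat.primeFactors.card = 3 := by omega
      have h4 := (pv_bridge n.toNat h1N hsf).mp h3
      rw [h4]
      norm_num
    · rintro ⟨hsf, h⟩
      refine ⟨hsf, ?_⟩
      have h4 : ((Finset.Ico 1 (n.toNat.sqrt + 1)).filter (· ∣ n.toNat)).card = 4 := by omega
      have h3 := (pv_bridge n.toNat h1N hsf).mpr h4
      rw [h3]
      norm_num

@[simp]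
theorem isPhenicNumAdvanced_raises : Claim_raises_isPhenicNumAdvanced := by
  unfold Claim_raises_isPhenicNumAdvanced
  refine ⟨?_, by decide⟩
  intro n _ h
  unfold Raises_isPhenicNumAdvanced at h
  unfold Pre_isPhenicNumAdvanced
  omega
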